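-- pv_equiv track=rewrite | github.com/MiLk/adventofcode | 2023/python/day11/__main__.py | expand_galaxies
-- ===== SOURCE A (Python) =====
-- def expand_galaxies(
--     galaxies: list[tuple[int, int]], columns_to_expand: set[int], rows_to_expand: set[int], factor: int
-- ) -> list[tuple[int, int]]:
--     return [
--         (
--             r + sum(er < r for er in rows_to_expand) * (factor - 1),
--             c + sum(ec < c for ec in columns_to_expand) * (factor - 1),
--         )
--         for r, c in galaxies
--     ]
-- ===== SOURCE B (Python) =====
-- def expand_galaxies(galaxies, columns_to_expand, rows_to_expand, factor):
--     rows = sorted(rows_to_expand)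
--     cols = sorted(columns_to_expand)
--     d = factor - 1
--
--     def count_lt(a, x):
--         lo, hi = 0, len(a)
--         while lo < hi:
--             mid = (lo + hi) // 2
--             if a[mid] < x:
--                 lo = mid + 1
--             else:
--                 hi = mid
--         return lo
--
--     return [(r + count_lt(rows, r) * d, c + count_lt(cols, c) * d)
--             for r, c in galaxies]
-- ===== Notes on version B (the rewrite author's own statement) =====
-- stated objective: faster
-- what changed: Instead of re-scanning the whole row/column expansion sets for every galaxy, B sorts each set once and counts preceding expansion lines per galaxy with a hand-written binary search.
import Mathlib
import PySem

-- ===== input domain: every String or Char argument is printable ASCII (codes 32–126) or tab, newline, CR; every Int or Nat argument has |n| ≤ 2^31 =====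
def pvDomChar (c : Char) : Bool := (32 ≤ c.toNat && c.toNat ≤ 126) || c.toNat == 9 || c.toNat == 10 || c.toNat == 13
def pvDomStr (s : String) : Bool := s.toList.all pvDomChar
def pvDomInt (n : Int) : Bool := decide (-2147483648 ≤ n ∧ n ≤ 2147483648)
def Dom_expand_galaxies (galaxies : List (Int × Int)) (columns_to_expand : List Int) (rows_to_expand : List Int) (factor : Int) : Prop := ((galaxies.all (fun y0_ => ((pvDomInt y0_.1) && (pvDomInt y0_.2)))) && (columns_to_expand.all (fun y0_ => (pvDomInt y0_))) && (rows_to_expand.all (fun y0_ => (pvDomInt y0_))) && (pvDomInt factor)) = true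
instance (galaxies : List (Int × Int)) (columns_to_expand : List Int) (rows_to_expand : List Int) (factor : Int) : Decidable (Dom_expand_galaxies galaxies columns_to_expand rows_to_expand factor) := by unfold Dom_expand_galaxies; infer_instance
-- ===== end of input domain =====

-- ===== PORT A =====
-- B replaces A's per-galaxy linear scans of the expansion sets by one sort plus binary search per galaxy (faster).
def expand_galaxies (galaxies : List (Int × Int)) (columns_to_expand : List Int) (rows_to_expand : List Int) (factor : Int) : List (Int × Int) :=
  galaxies.map (fun rc =>
    (rc.1 + (rows_to_expand.map (fun er => if er < rc.1 then (1 : Int) else 0)).sum * (factor - 1),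
     rc.2 + (columns_to_expand.map (fun ec => if ec < rc.2 then (1 : Int) else 0)).sum * (factor - 1)))

-- ===== PORT B =====
-- Source B's hand-written binary-search loop; a[mid] is only read with lo ≤ mid < hi ≤ a.length, so getD is exact there
def pvCountLt (a : List Int) (x : Int) (lo hi : Nat) : Nat :=
  if lo < hi then
    let mid := (lo + hi) / 2
    if a.getD mid 0 < x then pvCountLt a x (mid + 1) hi
    else pvCountLt a x lo mid
  else lo
termination_by hi - lo
decreasing_by all_goals omega

def expand_galaxies_alt (galaxies : List (Int × Int)) (columns_to_expand : List Int) (rows_to_expand : List Int) (factor : Int) : List (Int × Int) :=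
  let rows := PySem.List.sorted rows_to_expand (fun x => x) false
  let cols := PySem.List.sorted columns_to_expand (fun x => x) false
  let d := factor - 1
  galaxies.map (fun rc =>
    (rc.1 + (pvCountLt rows rc.1 0 rows.length : Int) * d,
     rc.2 + (pvCountLt cols rc.2 0 cols.length : Int) * d))

-- ===== PRECONDITION & SPEC =====
def Spec_expand_galaxies (galaxies : List (Int × Int)) (columns_to_expand : List Int) (rows_to_expand : List Int) (factor : Int) (out : List (Int × Int)) : Prop := out = expand_galaxies_alt galaxies columns_to_expand rows_to_expand factor
instance (galaxies : List (Int × Int)) (columns_to_expand : List Int) (rows_to_expand : List Int) (factor : Int) (out : List (Int × Int)) : Decidable (Spec_expand_galaxies galaxies columns_to_expand rows_to_expand factor out) := by unfold Spec_expand_galaxies; infer_instance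

-- ===== CLAIM (what is proved, stated in full; the proofs are below) =====
def Claim_equal_expand_galaxies : Prop := ∀ (galaxies : List (Int × Int)) (columns_to_expand : List Int) (rows_to_expand : List Int) (factor : Int), Dom_expand_galaxies galaxies columns_to_expand rows_to_expand factor → Spec_expand_galaxies galaxies columns_to_expand rows_to_expand factor (expand_galaxies galaxies columns_to_expand rows_to_expand factor)

-- ===== LEMMAS AND PROOFS =====

-- if all positions below k satisfy (· < x) and all positions from k on do not, then countP (· < x) = k
lemma countP_eq_boundary (a : List Int) (x : Int) (k : Nat) (hk : k ≤ a.length)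
    (h1 : ∀ i, i < k → a.getD i 0 < x)
    (h2 : ∀ i, k ≤ i → i < a.length → ¬ a.getD i 0 < x) :
    a.countP (fun y => decide (y < x)) = k := by
  have hsplit : a = a.take k ++ a.drop k := (List.take_append_drop k a).symm
  rw [hsplit, List.countP_append]
  have hlen : (a.take k).length = k := List.length_take_of_le hk
  have ht : (a.take k).countP (fun y => decide (y < x)) = k := by
    refine (List.countP_eq_length.mpr ?_).trans hlen
    intro y hy
    obtain ⟨i, hi, hget⟩ := List.mem_iff_getElem.mp hy
    have hik : i < k := hlen ▸ hi
    have hia : i < a.length := lt_of_lt_of_le hik hk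
    have : (a.take k)[i] = a[i] := List.getElem_take
    have := h1 i hik
    rw [List.getD_eq_getElem a 0 hia] at this
    simp only [List.getElem_take] at hget
    simpa [← hget]
  have hd : (a.drop k).countP (fun y => decide (y < x)) = 0 := by
    rw [List.countP_eq_zero]
    intro y hy
    obtain ⟨i, hi, hget⟩ := List.mem_iff_getElem.mp hy
    have hia : k + i < a.length := by
      have := hi; rw [List.length_drop] at this; omega
    have hget' : a[k + i] = y := by
      rw [← hget]; simp [List.getElem_drop]
    have := h2 (k + i) (Nat.le_add_right k i) hia
    rw [List.getD_eq_getElem a 0 hia, hget'] at this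
    simpa using this
  omega

-- the binary-search loop on a (getD-)monotone list computes countP (· < x)
lemma pvCountLt_loop (a : List Int) (x : Int)
    (mono : ∀ p q : Nat, p ≤ q → q < a.length → a.getD p 0 ≤ a.getD q 0) :
    ∀ lo hi : Nat, lo ≤ hi → hi ≤ a.length →
      (∀ i, i < lo → a.getD i 0 < x) →
      (∀ i, hi ≤ i → i < a.length → ¬ a.getD i 0 < x) →
      pvCountLt a x lo hi = a.countP (fun y => decide (y < x)) := by
  intro lo hi
  induction hn : hi - lo using Nat.strong_induction_on generalizing lo hi with
  | _ n ih =>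
    intro hle hha h1 h2
    rw [pvCountLt]
    by_cases hlt : lo < hi
    · simp only [hlt, if_true]
      set mid := (lo + hi) / 2 with hmid
      have hmlo : lo ≤ mid := by omega
      have hmhi : mid < hi := by omega
      have hmlen : mid < a.length := lt_of_lt_of_le hmhi hha
      by_cases hc : a.getD mid 0 < x
      · simp only [hc, if_true]
        exact ih (hi - (mid + 1)) (by omega) (mid + 1) hi rfl (by omega) hha
          (fun i hilt => lt_of_le_of_lt (mono i mid (by omega) hmlen) hc) h2
      · simp only [hc, if_false]
        exact ih (mid - lo) (by omega) lo mid rfl (by omega) (le_of_lt hmlen) h1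
          (fun i hmi hia => fun hax =>
            hc (lt_of_le_of_lt (mono mid i hmi hia) hax))
    · simp only [hlt, if_false]
      have heq : lo = hi := by omega
      exact (countP_eq_boundary a x lo (heq ▸ hha) h1 (heq ▸ h2)).symm

-- full-range binary search on sorted(s) counts the elements of s below x
lemma pvCountLt_sorted (s : List Int) (x : Int) :
    pvCountLt (PySem.List.sorted s (fun y => y) false) x 0
      (PySem.List.sorted s (fun y => y) false).length
    = s.countP (fun y => decide (y < x)) := by
  set a := PySem.List.sorted s (fun y => y) false with ha
  have hpw : List.Pairwise (fun p q : Int => p ≤ q) a := by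
    simpa using PySem.List.sorted_pairwise s (fun y => y)
  have mono : ∀ p q : Nat, p ≤ q → q < a.length → a.getD p 0 ≤ a.getD q 0 := by
    intro p q hpq hq
    have hp : p < a.length := lt_of_le_of_lt (Nat.lt_succ_iff.mp (Nat.lt_succ_of_le hpq)) hq
    rw [List.getD_eq_getElem a 0 hp, List.getD_eq_getElem a 0 hq]
    rcases Nat.lt_or_ge p q with h | h
    · exact List.pairwise_iff_getElem.mp hpw p q hp hq h
    · have : p = q := by omega
      subst this; rfl
  have := pvCountLt_loop a x mono 0 a.length (Nat.zero_le _) (le_refl _)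
    (by intro i hi; omega) (by intro i hi hia; omega)
  rw [this]
  exact (PySem.List.sorted_perm s (fun y => y) false).countP_eq _

-- A's 0/1-sum equals B's binary-search count, per coordinate
lemma sum_ite_eq_pvCountLt (s : List Int) (x : Int) :
    (s.map (fun e => if e < x then (1 : Int) else 0)).sum
    = (pvCountLt (PySem.List.sorted s (fun y => y) false) x 0
        (PySem.List.sorted s (fun y => y) false).length : Int) := by
  rw [pvCountLt_sorted]
  have := PySem.List.sum_map_ite_one_zero (fun e : Int => decide (e < x)) s
  simpa using this

-- ===== VERDICT (by name: the statement is the Claim_ definition above) =====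
theorem expand_galaxies_spec : Claim_equal_expand_galaxies := by
  intro galaxies columns_to_expand rows_to_expand factor _
  unfold Spec_expand_galaxies expand_galaxies expand_galaxies_alt
  simp only []
  apply List.map_congr_left
  intro rc _
  rw [sum_ite_eq_pvCountLt rows_to_expand rc.1, sum_ite_eq_pvCountLt columns_to_expand rc.2]
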